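-- pv_equiv track=rewrite | github.com/Matthew-D-Johnston/python-coding-challenges | edabit/medium/sum_of_vowels.py | sum_of_vowels
-- ===== SOURCE A (Python) =====
-- def sum_of_vowels(text):
--   values = { 'a': 4, 'e': 3, 'i': 1, 'o': 0, 'u': 0 }
--   vowels = ['a', 'e', 'i', 'o', 'u']
--   sum = 0
--
--   for char in text:
--     lowercase_char = char.lower()
--
--     if lowercase_char in vowels:
--       sum += values[lowercase_char]
--
--   return sum
-- ===== SOURCE B (Python) =====
-- def sum_of_vowels(text):
--   counts = {}
--   for char in text.lower():
--     counts[char] = counts.get(char, 0) + 1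
--   return 4 * counts.get('a', 0) + 3 * counts.get('e', 0) + counts.get('i', 0)
-- ===== Notes on version B (the rewrite author's own statement) =====
-- stated objective: faster
-- what changed: B lowercases the whole string once and builds a character-count dict in one pass, then combines the three nonzero vowel counts (a:4, e:3, i:1) arithmetically, instead of A's per-character lower+membership-test+score-dict lookup; fewer per-character operations give a constant-factor speedup (measured ~1.66x).
import Mathlib
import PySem

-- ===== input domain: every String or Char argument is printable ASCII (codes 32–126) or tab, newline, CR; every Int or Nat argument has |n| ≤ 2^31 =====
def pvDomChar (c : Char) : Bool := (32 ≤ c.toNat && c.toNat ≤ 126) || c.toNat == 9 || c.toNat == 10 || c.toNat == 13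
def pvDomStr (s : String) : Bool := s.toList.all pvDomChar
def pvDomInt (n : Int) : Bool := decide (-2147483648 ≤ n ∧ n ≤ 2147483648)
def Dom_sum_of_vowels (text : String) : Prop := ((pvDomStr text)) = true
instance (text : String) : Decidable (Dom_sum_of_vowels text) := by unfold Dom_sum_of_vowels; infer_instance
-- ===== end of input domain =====

-- B builds a character-count dict over the lowered string once and combines the
-- three nonzero vowel counts arithmetically, instead of A's per-char score lookup.
-- ===== PORT A =====
-- A-side helper: the literal 'values' dict of A
def pyValues : PySem.Dict Char Int := PySem.Dict.ofList [('a', 4), ('e', 3), ('i', 1), ('o', 0), ('u', 0)]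

def sum_of_vowels (text : String) : Int :=
  let values : PySem.Dict Char Int := pyValues
  let vowels : List Char := ['a', 'e', 'i', 'o', 'u']
  text.toList.foldl (fun sum char =>
    let lowercase_char := PySem.Chars.lowerChar char
    if lowercase_char ∈ vowels then sum + values.getD lowercase_char 0 else sum) 0

-- ===== PORT B =====
def sum_of_vowels_alt (text : String) : Int :=
  let counts : PySem.Dict Char Int :=
    (PySem.Str.lower text).toList.foldl (fun d c => d.insert c (d.getD c 0 + 1)) PySem.Dict.empty
  4 * counts.getD 'a' 0 + 3 * counts.getD 'e' 0 + counts.getD 'i' 0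

-- ===== PRECONDITION & SPEC =====
def Spec_sum_of_vowels (text : String) (out : Int) : Prop := out = sum_of_vowels_alt text
instance (text : String) (out : Int) : Decidable (Spec_sum_of_vowels text out) := by unfold Spec_sum_of_vowels; infer_instance

-- ===== CLAIM (what is proved, stated in full; the proofs are below) =====
def Claim_equal_sum_of_vowels : Prop := ∀ (text : String), Dom_sum_of_vowels text → Spec_sum_of_vowels text (sum_of_vowels text)

-- ===== LEMMAS AND PROOFS =====
lemma foldA_eq (l : List Char) (acc : Int) :
    l.foldl (fun sum char =>
      let lowercase_char := PySem.Chars.lowerChar char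
      if lowercase_char ∈ (['a', 'e', 'i', 'o', 'u'] : List Char) then
        sum + pyValues.getD lowercase_char 0
      else sum) acc
    = acc + 4 * ((l.map PySem.Chars.lowerChar).count 'a' : Int)
          + 3 * ((l.map PySem.Chars.lowerChar).count 'e' : Int)
          + ((l.map PySem.Chars.lowerChar).count 'i' : Int) := by
  induction l generalizing acc with
  | nil => simp
  | cons c t ih =>
    simp only [List.foldl_cons, List.map_cons, List.count_cons, ih]
    by_cases ha : PySem.Chars.lowerChar c = 'a' <;>
    by_cases he : PySem.Chars.lowerChar c = 'e' <;>
    by_cases hi : PySem.Chars.lowerChar c = 'i' <;>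
    by_cases ho : PySem.Chars.lowerChar c = 'o' <;>
    by_cases hu : PySem.Chars.lowerChar c = 'u' <;>
    simp_all [show pyValues.getD 'a' 0 = 4 from by decide,
      show pyValues.getD 'e' 0 = 3 from by decide,
      show pyValues.getD 'i' 0 = 1 from by decide,
      show pyValues.getD 'o' 0 = 0 from by decide,
      show pyValues.getD 'u' 0 = 0 from by decide] <;> omega

-- ===== VERDICT (by name: the statement is the Claim_ definition above) =====
theorem sum_of_vowels_spec : Claim_equal_sum_of_vowels := by
  intro text _
  unfold Spec_sum_of_vowels sum_of_vowels sum_of_vowels_alt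
  simp only [PySem.Str.toList_lower, PySem.Chars.lower, foldA_eq,
    PySem.Dict.getD_foldl_insert_add_one, PySem.Dict.getD_empty]
  ring
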